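-- pv_equiv track=rewrite | github.com/xuy8w89/TECHIN515-RFID_tracking | scripts/compare_155629_nonoverlap.py | _frame_to_window_indices
-- ===== SOURCE A (Python) =====
-- def _frame_to_window_indices(frame_lo: int, frame_hi: int, window: int, n_windows: int) -> list[int]:
--     """Window index j has its last frame at j + window - 1.
--     For each frame f in [frame_lo, frame_hi), pick j = f - (window - 1).
--     """
--     out = []
--     for f in range(frame_lo, frame_hi):
--         j = f - (window - 1)
--         if j < 0 or j >= n_windows:
--             raise SystemExit(
--                 f"Frame {f} cannot be predicted with window={window}: "
--                 f"need ds[{j}] but n_windows={n_windows}"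
--             )
--         out.append(j)
--     return out
-- ===== SOURCE B (Python) =====
-- def _frame_to_window_indices(frame_lo: int, frame_hi: int, window: int, n_windows: int) -> list[int]:
--     """Closed form: the window indices are simply the contiguous range
--     [frame_lo-(window-1), frame_hi-(window-1)), after checking both ends."""
--     if frame_lo >= frame_hi:
--         return []
--     j_lo = frame_lo - (window - 1)
--     if j_lo < 0:
--         raise SystemExit(
--             f"Frame {frame_lo} cannot be predicted with window={window}: "
--             f"need ds[{j_lo}] but n_windows={n_windows}"
--         )
--     if frame_hi - (window - 1) > n_windows:
--         # first offending frame the ascending scan would hit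
--         f = max(frame_lo, n_windows + (window - 1))
--         raise SystemExit(
--             f"Frame {f} cannot be predicted with window={window}: "
--             f"need ds[{f - (window - 1)}] but n_windows={n_windows}"
--         )
--     return list(range(j_lo, frame_hi - (window - 1)))
-- ===== Notes on version B (the rewrite author's own statement) =====
-- stated objective: simpler
-- what changed: Replaces the per-frame scan-and-check loop with O(1) bounds checks on the two endpoints plus a single closed-form range construction; Pre_ excludes exactly the inputs on which A raises SystemExit (B raises there too, with the same message).
import Mathlib
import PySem

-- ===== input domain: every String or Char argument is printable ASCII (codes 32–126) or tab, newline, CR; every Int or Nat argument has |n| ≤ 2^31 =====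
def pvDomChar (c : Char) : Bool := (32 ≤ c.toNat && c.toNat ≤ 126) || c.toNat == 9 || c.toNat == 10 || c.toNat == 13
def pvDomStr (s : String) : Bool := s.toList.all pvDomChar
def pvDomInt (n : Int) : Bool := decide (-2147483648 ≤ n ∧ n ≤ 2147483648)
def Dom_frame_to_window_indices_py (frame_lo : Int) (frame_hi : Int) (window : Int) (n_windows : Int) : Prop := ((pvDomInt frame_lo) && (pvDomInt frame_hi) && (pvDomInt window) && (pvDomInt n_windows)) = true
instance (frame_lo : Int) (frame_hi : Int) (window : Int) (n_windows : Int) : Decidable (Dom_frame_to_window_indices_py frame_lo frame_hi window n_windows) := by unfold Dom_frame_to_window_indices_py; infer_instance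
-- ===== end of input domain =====

-- B replaces A's per-frame loop by two endpoint bounds checks and a closed-form range.
-- Pre_ excludes exactly the inputs where A raises SystemExit; B raises there too.

-- ===== PORT A =====
-- the for-loop over range(frame_lo, frame_hi); the 'raise SystemExit' branch stops with the
-- accumulator (unreachable under Pre_)
def frameLoopA (fs : List Int) (window : Int) (n_windows : Int) (out : List Int) : List Int :=
  match fs with
  | [] => out
  | f :: rest =>
    let j := f - (window - 1)
    if j < 0 ∨ j ≥ n_windows then out   -- raise SystemExit
    else frameLoopA rest window n_windows (out ++ [j])

def frame_to_window_indices_py (frame_lo : Int) (frame_hi : Int) (window : Int) (n_windows : Int) : List Int :=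
  frameLoopA (PySem.List.pyRange frame_lo frame_hi 1) window n_windows []

-- ===== PORT B =====
def frame_to_window_indices_py_alt (frame_lo : Int) (frame_hi : Int) (window : Int) (n_windows : Int) : List Int :=
  if frame_lo ≥ frame_hi then []
  else
    let j_lo := frame_lo - (window - 1)
    if j_lo < 0 then []   -- raise SystemExit (unreachable under Pre_)
    else if frame_hi - (window - 1) > n_windows then []   -- raise SystemExit (unreachable under Pre_)
    else PySem.List.pyRange j_lo (frame_hi - (window - 1)) 1

-- ===== PRECONDITION & SPEC =====
-- Pre_ is exactly the set of inputs on which the Python A returns normally (otherwise it raises SystemExit):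
-- the frame range is empty, or both endpoints map to valid window indices.
def Pre_frame_to_window_indices_py (frame_lo : Int) (frame_hi : Int) (window : Int) (n_windows : Int) : Prop :=
  frame_hi ≤ frame_lo ∨ (window - 1 ≤ frame_lo ∧ frame_hi - window < n_windows)
instance (frame_lo : Int) (frame_hi : Int) (window : Int) (n_windows : Int) : Decidable (Pre_frame_to_window_indices_py frame_lo frame_hi window n_windows) := by unfold Pre_frame_to_window_indices_py; infer_instance
def pvWitness_frame_to_window_indices_py : Int × Int × Int × Int := (3, 6, 2, 10)

def Spec_frame_to_window_indices_py (frame_lo : Int) (frame_hi : Int) (window : Int) (n_windows : Int) (out : List Int) : Prop := out = frame_to_window_indices_py_alt frame_lo frame_hi window n_windows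
instance (frame_lo : Int) (frame_hi : Int) (window : Int) (n_windows : Int) (out : List Int) : Decidable (Spec_frame_to_window_indices_py frame_lo frame_hi window n_windows out) := by unfold Spec_frame_to_window_indices_py; infer_instance

-- ===== CLAIM (what is proved, stated in full; the proofs are below) =====
def Claim_equal_frame_to_window_indices_py : Prop := ∀ (frame_lo : Int) (frame_hi : Int) (window : Int) (n_windows : Int), Dom_frame_to_window_indices_py frame_lo frame_hi window n_windows → Pre_frame_to_window_indices_py frame_lo frame_hi window n_windows → Spec_frame_to_window_indices_py frame_lo frame_hi window n_windows (frame_to_window_indices_py frame_lo frame_hi window n_windows)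

-- ===== LEMMAS AND PROOFS =====

-- Loop invariant: when every frame in [lo, hi) maps inside [0, n_windows), A's loop appends
-- exactly the shifted range.
lemma frameLoopA_eq (w n hi : Int) :
    ∀ (k : Nat) (lo : Int) (out : List Int), (hi - lo).toNat = k →
      w - 1 ≤ lo → hi - w < n →
      frameLoopA (PySem.List.pyRange lo hi 1) w n out
        = out ++ PySem.List.pyRange (lo - (w - 1)) (hi - (w - 1)) 1 := by
  intro k
  induction k with
  | zero =>
    intro lo out hk h1 h2
    have hle : hi ≤ lo := by omega
    rw [PySem.List.pyRange_one_eq_nil hle, PySem.List.pyRange_one_eq_nil (by omega)]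
    simp [frameLoopA]
  | succ m ih =>
    intro lo out hk h1 h2
    have hlt : lo < hi := by omega
    rw [PySem.List.pyRange_one_cons hlt, PySem.List.pyRange_one_cons (show lo - (w-1) < hi - (w-1) by omega)]
    have hbound : ¬ (lo - (w - 1) < 0 ∨ lo - (w - 1) ≥ n) := by omega
    simp only [frameLoopA, if_neg hbound]
    rw [ih (lo + 1) (out ++ [lo - (w - 1)]) (by omega) (by omega) h2,
        show lo + 1 - (w - 1) = lo - (w - 1) + 1 by ring]
    simp

-- ===== VERDICT (by name: the statement is the Claim_ definition above) =====
theorem frame_to_window_indices_py_spec : Claim_equal_frame_to_window_indices_py := by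
  intro lo hi w n _ hpre
  unfold Spec_frame_to_window_indices_py frame_to_window_indices_py frame_to_window_indices_py_alt
  rcases hpre with h | ⟨h1, h2⟩
  · by_cases hle : lo ≥ hi
    · rw [PySem.List.pyRange_one_eq_nil (by omega)]
      simp [frameLoopA, hle]
    · omega
  · by_cases hle : lo ≥ hi
    · rw [PySem.List.pyRange_one_eq_nil (by omega)]
      simp [frameLoopA, hle]
    · rw [frameLoopA_eq w n hi (hi - lo).toNat lo [] rfl h1 h2]
      simp only [if_neg hle]
      rw [if_neg (by omega), if_neg (by omega)]
      simp
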